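-- pv_equiv track=rewrite | github.com/zhangdoa/Folkets-Lexikon-Yomitanized | usage_builder.py | _smart_split_usage
-- ===== SOURCE A (Python) =====
-- from typing import List, Dict
--
-- def _smart_split_usage(usage_text: str) -> List[str]:
--     """Split usage text by semicolon + space, but not inside quotes. Removes leading/trailing semicolons and spaces from each part."""
--     parts = []
--     current_part = ""
--     in_quotes = False
--     i = 0
--
--     while i < len(usage_text):
--         char = usage_text[i]
--
--         if char == '"':
--             in_quotes = not in_quotes
--             current_part += char
--         elif char == ';' and not in_quotes:
--             # Check if next character is a space
--             if i + 1 < len(usage_text) and usage_text[i + 1] == ' ':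
--                 # Split on "; "
--                 cleaned = current_part.strip().lstrip(';').strip()
--                 if cleaned:
--                     parts.append(cleaned)
--                 current_part = ""
--                 i += 1  # Skip the space after semicolon
--             else:
--                 # Keep the semicolon as part of the text
--                 current_part += char
--         else:
--             current_part += char
--
--         i += 1
--
--     cleaned = current_part.strip().lstrip(';').strip()
--     if cleaned:
--         parts.append(cleaned)
--
--     return parts
-- ===== SOURCE B (Python) =====
-- from typing import List
--
--
-- def _smart_split_usage(usage_text: str) -> List[str]:
--     """Two-phase version: find the next '; ' boundary outside quotes, slice the
--     string into raw segments, then clean each segment in a second pass."""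
--
--     def _clean(s: str) -> str:
--         return s.strip().lstrip(';').strip()
--
--     def _first_boundary(s: str):
--         in_quotes = False
--         for i, ch in enumerate(s):
--             if ch == '"':
--                 in_quotes = not in_quotes
--             elif ch == ';' and not in_quotes and i + 1 < len(s) and s[i + 1] == ' ':
--                 return i
--         return None
--
--     segments = []
--     rest = usage_text
--     while True:
--         b = _first_boundary(rest)
--         if b is None:
--             segments.append(rest)
--             break
--         segments.append(rest[:b])
--         rest = rest[b + 2:]
--
--     return [c for c in map(_clean, segments) if c]
-- ===== Notes on version B (the rewrite author's own statement) =====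
-- stated objective: faster
-- what changed: Replaces A's single state-machine loop that builds each part by repeated character concatenation and cleans/appends inline with a two-phase design: a boundary finder locates the next semicolon-space boundary outside quotes, the string is sliced into raw segments, and a separate comprehension cleans and filters them.
import Mathlib
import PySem

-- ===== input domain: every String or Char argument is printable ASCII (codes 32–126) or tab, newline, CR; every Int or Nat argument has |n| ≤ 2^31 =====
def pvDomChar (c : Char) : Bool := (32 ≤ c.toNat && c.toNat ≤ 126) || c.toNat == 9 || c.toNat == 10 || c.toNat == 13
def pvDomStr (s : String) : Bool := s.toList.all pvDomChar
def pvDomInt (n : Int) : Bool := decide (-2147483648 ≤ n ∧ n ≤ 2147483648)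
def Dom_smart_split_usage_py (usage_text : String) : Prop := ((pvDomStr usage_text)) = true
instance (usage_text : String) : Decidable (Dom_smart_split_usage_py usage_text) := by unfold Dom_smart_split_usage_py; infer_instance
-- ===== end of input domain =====

-- B replaces A's accumulate-and-clean state-machine loop (quadratic character concatenation) with boundary search + slicing + a separate clean/filter pass; measured faster in a timing run.


-- ===== PORT A =====
-- cleaned = current_part.strip().lstrip(';').strip()
-- (lstrip(';') with the one-char set {';'} is exactly dropWhile (· == ';'))
def cleanA (cs : List Char) : List Char :=
  PySem.Chars.strip ((PySem.Chars.strip cs).dropWhile (· == ';'))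

-- the while loop over i, with state (parts, current_part, in_quotes); indexing
-- usage_text[i] / the guarded lookahead 'i+1 < len and usage_text[i+1] == " "'
-- becomes structural recursion on the char list with 'rest.head? = some ' ''
def loopA : List Char → List (List Char) → List Char → Bool → List (List Char)
  | [], parts, cur, _ =>
      if cleanA cur ≠ [] then parts ++ [cleanA cur] else parts
  | ch :: rest, parts, cur, inq =>
      if ch = '"' then loopA rest parts (cur ++ [ch]) (!inq)
      else if ch = ';' ∧ inq = false then
        if rest.head? = some ' ' then
          loopA rest.tail (if cleanA cur ≠ [] then parts ++ [cleanA cur] else parts) [] inq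
        else loopA rest parts (cur ++ [ch]) inq
      else loopA rest parts (cur ++ [ch]) inq
termination_by cs _ _ _ => cs.length
decreasing_by all_goals (simp only [List.length_tail, List.length_cons]; omega)

def smart_split_usage_py (usage_text : String) : List String :=
  (loopA usage_text.toList [] [] false).map String.ofList

-- ===== PORT B =====
def cleanB (cs : List Char) : List Char :=
  PySem.Chars.strip ((PySem.Chars.strip cs).dropWhile (· == ';'))

-- _first_boundary: index of the first ';' outside quotes followed by ' ', else none
def findB : List Char → Bool → Option Nat
  | [], _ => none
  | ch :: rest, inq =>
      if ch = '"' then (findB rest (!inq)).map (· + 1)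
      else if ch = ';' ∧ inq = false then
        if rest.head? = some ' ' then some 0
        else (findB rest inq).map (· + 1)
      else (findB rest inq).map (· + 1)

theorem findB_lt (s : List Char) (inq : Bool) (b : Nat) (h : findB s inq = some b) :
    b + 1 < s.length := by
  induction s generalizing inq b with
  | nil => simp [findB] at h
  | cons ch rest ih =>
    simp only [findB] at h
    split_ifs at h with h1 h2 h3
    · obtain ⟨b', hb', rfl⟩ := Option.map_eq_some_iff.mp h
      have := ih _ _ hb'; simp; omega
    · cases h
      cases rest with
      | nil => simp at h3
      | cons c r => simp
    · obtain ⟨b', hb', rfl⟩ := Option.map_eq_some_iff.mp h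
      have := ih _ _ hb'; simp; omega
    · obtain ⟨b', hb', rfl⟩ := Option.map_eq_some_iff.mp h
      have := ih _ _ hb'; simp; omega

-- the while True loop: slice off segments at each boundary, final tail segment
def segB (s : List Char) : List (List Char) :=
  match h : findB s false with
  | none => [s]
  | some b => s.take b :: segB (s.drop (b + 2))
termination_by s.length
decreasing_by
  have := findB_lt s false b h
  simp; omega

def smart_split_usage_py_alt (usage_text : String) : List String :=
  ((((segB usage_text.toList).map cleanB).filter (· ≠ [])).map String.ofList)

-- ===== PRECONDITION & SPEC =====
def Spec_smart_split_usage_py (usage_text : String) (out : List String) : Prop := out = smart_split_usage_py_alt usage_text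
instance (usage_text : String) (out : List String) : Decidable (Spec_smart_split_usage_py usage_text out) := by unfold Spec_smart_split_usage_py; infer_instance

-- ===== CLAIM (what is proved, stated in full; the proofs are below) =====
def Claim_equal_smart_split_usage_py : Prop := ∀ (usage_text : String), Dom_smart_split_usage_py usage_text → Spec_smart_split_usage_py usage_text (smart_split_usage_py usage_text)

-- ===== LEMMAS AND PROOFS =====

-- raw segmentation of the remaining text under a quote state:
-- (rest of the current segment, the later segments)
def segW : List Char → Bool → List Char × List (List Char)
  | [], _ => ([], [])
  | ch :: rest, inq =>
      if ch = '"' then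
        let p := segW rest (!inq); (ch :: p.1, p.2)
      else if ch = ';' ∧ inq = false then
        if rest.head? = some ' ' then
          let p := segW rest.tail inq; ([], p.1 :: p.2)
        else let p := segW rest inq; (ch :: p.1, p.2)
      else let p := segW rest inq; (ch :: p.1, p.2)
termination_by cs _ => cs.length
decreasing_by all_goals (simp only [List.length_tail, List.length_cons]; omega)

theorem loopA_eq_segW (cs : List Char) (parts : List (List Char)) (cur : List Char)
    (inq : Bool) :
    loopA cs parts cur inq =
      parts ++ (((cur ++ (segW cs inq).1) :: (segW cs inq).2).map cleanA).filter (· ≠ []) := by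
  induction cs, parts, cur, inq using loopA.induct with
  | case1 parts cur x h => simp [loopA, segW, h]
  | case2 parts cur x h => simp [loopA, segW, h]
  | case3 rest parts cur inq ih => simp [loopA, segW, ih]
  | case4 ch rest parts cur inq h1 h2 h3 ih =>
    simp only [dite_eq_ite] at ih
    simp only [loopA, segW, if_neg h1, if_pos h2, if_pos h3, ih]
    by_cases hc : cleanA cur = [] <;>
      simp [hc, List.filter_cons]
  | case5 ch rest parts cur inq h1 h2 h3 ih =>
    simp only [loopA, segW, if_neg h1, if_pos h2, if_neg h3, ih, List.append_assoc,
      List.singleton_append]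
  | case6 ch rest parts cur inq h1 h2 ih =>
    simp only [loopA, segW, if_neg h1, if_neg h2, ih, List.append_assoc,
      List.singleton_append]

theorem findB_none_segW (s : List Char) (inq : Bool) (h : findB s inq = none) :
    segW s inq = (s, []) := by
  induction s generalizing inq with
  | nil => simp [segW]
  | cons ch rest ih =>
    simp only [findB] at h
    split_ifs at h with h1 h2 h3
    · simp only [segW, if_pos h1]
      rw [ih _ (by simpa using h)]
    · simp only [segW, if_neg h1, if_pos h2, if_neg h3]
      rw [ih _ (by simpa using h)]
    · simp only [segW, if_neg h1, if_neg h2]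
      rw [ih _ (by simpa using h)]

theorem findB_some_segW (s : List Char) (inq : Bool) (b : Nat)
    (h : findB s inq = some b) :
    segW s inq = (s.take b, (segW (s.drop (b + 2)) false).1 :: (segW (s.drop (b + 2)) false).2) := by
  induction s generalizing inq b with
  | nil => simp [findB] at h
  | cons ch rest ih =>
    simp only [findB] at h
    split_ifs at h with h1 h2 h3
    · obtain ⟨b', hb', rfl⟩ := Option.map_eq_some_iff.mp h
      simp only [segW, if_pos h1, ih _ _ hb']
      simp
    · cases h
      have hinq : inq = false := h2.2
      subst hinq
      cases rest with
      | nil => simp at h3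
      | cons c r =>
        simp at h3; subst h3
        simp [segW, h2]
    · obtain ⟨b', hb', rfl⟩ := Option.map_eq_some_iff.mp h
      simp only [segW, if_neg h1, if_pos h2, if_neg h3, ih _ _ hb']
      simp
    · obtain ⟨b', hb', rfl⟩ := Option.map_eq_some_iff.mp h
      simp only [segW, if_neg h1, if_neg h2, ih _ _ hb']
      simp

theorem segB_eq_segW (s : List Char) :
    segB s = (segW s false).1 :: (segW s false).2 := by
  induction s using segB.induct with
  | case1 s h =>
    rw [segB.eq_def]
    split
    · next h' => rw [findB_none_segW s false h']
    · next b h' => rw [h'] at h; cases h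
  | case2 s b h ih =>
    rw [segB.eq_def]
    split
    · next h' => rw [h'] at h; cases h
    · rename_i b2 h'
      rw [h'] at h
      cases h
      rw [findB_some_segW s false b h', ih]

theorem cleanB_eq_cleanA : cleanB = cleanA := rfl

-- ===== VERDICT (by name: the statement is the Claim_ definition above) =====
theorem smart_split_usage_py_spec : Claim_equal_smart_split_usage_py := by
  intro s _
  unfold Spec_smart_split_usage_py smart_split_usage_py smart_split_usage_py_alt
  rw [segB_eq_segW, cleanB_eq_cleanA, loopA_eq_segW]
  simp
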